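-- pv_equiv track=rewrite | github.com/kongsa0419/ProblemSolversHub | week4/Baekjoon30031/dohyungLee/baekjoon_30031.py | sum_money
-- ===== SOURCE A (Python) =====
-- def sum_money(width_list) :
--     # 지폐의 총액을 0으로 초기화
--     total_money = 0
--
--     # 가로 배열을 배열에서 꺼낸다
--     for i in width_list :
--         # 136mm -> 1,000원
--         if i == 136 :
--             total_money += 1000
--
--         # 142mm -> 5,000원
--         elif i == 142 :
--             total_money += 5000
--
--         # 148mm -> 10,000원
--         elif i == 148 :
--             total_money += 10000
--
--         # 154mm -> 50,000원
--         elif i == 154 :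
--             total_money += 50000
--
--     # 지폐의 총합 반환
--     return total_money
-- ===== SOURCE B (Python) =====
-- def sum_money(width_list):
--     counts = {}
--     for w in width_list:
--         counts[w] = counts.get(w, 0) + 1
--     return (1000 * counts.get(136, 0)
--             + 5000 * counts.get(142, 0)
--             + 10000 * counts.get(148, 0)
--             + 50000 * counts.get(154, 0))
-- ===== Notes on version B (the rewrite author's own statement) =====
-- stated objective: alternative
-- what changed: Replaces the per-element branch-and-add loop by one frequency-tally pass into a dict followed by a fixed closed-form sum over the four denominations.
import Mathlib
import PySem

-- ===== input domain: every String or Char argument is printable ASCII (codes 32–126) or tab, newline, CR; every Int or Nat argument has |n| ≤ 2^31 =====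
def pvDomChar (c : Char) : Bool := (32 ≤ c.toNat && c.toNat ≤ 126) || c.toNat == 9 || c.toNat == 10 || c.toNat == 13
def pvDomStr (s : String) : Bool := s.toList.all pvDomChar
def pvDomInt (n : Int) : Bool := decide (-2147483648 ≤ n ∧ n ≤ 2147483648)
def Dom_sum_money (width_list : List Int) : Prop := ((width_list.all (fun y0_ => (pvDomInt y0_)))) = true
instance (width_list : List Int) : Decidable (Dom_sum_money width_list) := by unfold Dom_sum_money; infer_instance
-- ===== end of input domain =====

-- B replaces A's per-element branch-and-add loop by a frequency tally followed by a fixed closed-form sum over four denominations (alternative decomposition, same cost).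


-- ===== PORT A =====
def sum_money (width_list : List Int) : Int :=
  width_list.foldl (fun total_money i =>
    if i == 136 then total_money + 1000
    else if i == 142 then total_money + 5000
    else if i == 148 then total_money + 10000
    else if i == 154 then total_money + 50000
    else total_money) 0

-- ===== PORT B =====
def sum_money_alt (width_list : List Int) : Int :=
  let counts : PySem.Dict Int Int :=
    width_list.foldl (fun d w => d.insert w (d.getD w 0 + 1)) PySem.Dict.empty
  1000 * counts.getD 136 0
    + 5000 * counts.getD 142 0
    + 10000 * counts.getD 148 0
    + 50000 * counts.getD 154 0

-- ===== PRECONDITION & SPEC =====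
def Spec_sum_money (width_list : List Int) (out : Int) : Prop := out = sum_money_alt width_list
instance (width_list : List Int) (out : Int) : Decidable (Spec_sum_money width_list out) := by unfold Spec_sum_money; infer_instance

-- ===== CLAIM (what is proved, stated in full; the proofs are below) =====
def Claim_equal_sum_money : Prop := ∀ (width_list : List Int), Dom_sum_money width_list → Spec_sum_money width_list (sum_money width_list)

-- ===== LEMMAS AND PROOFS =====

-- ===== VERDICT (by name: the statement is the Claim_ definition above) =====
theorem sum_money_alt_closed (l : List Int) :
    sum_money_alt l = 1000 * l.count 136 + 5000 * l.count 142
      + 10000 * l.count 148 + 50000 * l.count 154 := by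
  simp [sum_money_alt, PySem.Dict.getD_foldl_insert_add_one]

theorem sum_money_foldl (l : List Int) (a : Int) :
    l.foldl (fun total_money i =>
      if i == 136 then total_money + 1000
      else if i == 142 then total_money + 5000
      else if i == 148 then total_money + 10000
      else if i == 154 then total_money + 50000
      else total_money) a
    = a + 1000 * l.count 136 + 5000 * l.count 142
      + 10000 * l.count 148 + 50000 * l.count 154 := by
  induction l generalizing a with
  | nil => simp
  | cons x xs ih =>
    simp only [List.foldl_cons, ih, List.count_cons]
    split_ifs with h1 h2 h3 h4 <;> simp_all <;> push_cast <;> ring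

theorem sum_money_spec : Claim_equal_sum_money := by
  intro l _
  show sum_money l = sum_money_alt l
  rw [sum_money_alt_closed, sum_money, sum_money_foldl]
  ring
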